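-- pv_equiv track=rewrite | github.com/Kerber0/Programacion | Python/recuperacion/examen_ud3_corregido.py | compararFrutas
-- ===== SOURCE A (Python) =====
-- def compararFrutas(frutas1: set, frutas2: set, frutas3: set) -> dict:
--     """
--     Compara tres conjuntos de frutas y devuelve:
--       - FrutasTotales: unión de los tres conjuntos
--       - FrutasComunes: intersección de los tres conjuntos
--       - FrutasUnicas: frutas que aparecen en exactamente uno de los conjuntos
--     """
--     if not all(isinstance(f, set) for f in (frutas1, frutas2, frutas3)):
--         raise ValueError("Todos los argumentos deben ser conjuntos")
--     totales = frutas1 | frutas2 | frutas3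
--     comunes = frutas1 & frutas2 & frutas3
--     unicas = {f for f in totales if [f in frutas1, f in frutas2, f in frutas3].count(True) == 1}
--     return {
--         "FrutasTotales": totales,
--         "FrutasComunes": comunes,
--         "FrutasUnicas": unicas,
--     }
-- ===== SOURCE B (Python) =====
-- def compararFrutas(frutas1: set, frutas2: set, frutas3: set) -> dict:
--     """B: one counting pass over all three sets; each output read off the counter."""
--     if not all(isinstance(f, set) for f in (frutas1, frutas2, frutas3)):
--         raise ValueError("Todos los argumentos deben ser conjuntos")
--     cnt = {}
--     for grupo in (frutas1, frutas2, frutas3):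
--         for f in grupo:
--             cnt[f] = cnt.get(f, 0) + 1
--     return {
--         "FrutasTotales": set(cnt),
--         "FrutasComunes": {f for f, c in cnt.items() if c == 3},
--         "FrutasUnicas": {f for f, c in cnt.items() if c == 1},
--     }
-- ===== Notes on version B (the rewrite author's own statement) =====
-- stated objective: alternative
-- what changed: B makes one counting pass building a dict element -> number of sets containing it, then reads all three outputs off the counter (keys; count==3; count==1) instead of A's separate union, double intersection and membership-counting comprehension
import Mathlib
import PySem

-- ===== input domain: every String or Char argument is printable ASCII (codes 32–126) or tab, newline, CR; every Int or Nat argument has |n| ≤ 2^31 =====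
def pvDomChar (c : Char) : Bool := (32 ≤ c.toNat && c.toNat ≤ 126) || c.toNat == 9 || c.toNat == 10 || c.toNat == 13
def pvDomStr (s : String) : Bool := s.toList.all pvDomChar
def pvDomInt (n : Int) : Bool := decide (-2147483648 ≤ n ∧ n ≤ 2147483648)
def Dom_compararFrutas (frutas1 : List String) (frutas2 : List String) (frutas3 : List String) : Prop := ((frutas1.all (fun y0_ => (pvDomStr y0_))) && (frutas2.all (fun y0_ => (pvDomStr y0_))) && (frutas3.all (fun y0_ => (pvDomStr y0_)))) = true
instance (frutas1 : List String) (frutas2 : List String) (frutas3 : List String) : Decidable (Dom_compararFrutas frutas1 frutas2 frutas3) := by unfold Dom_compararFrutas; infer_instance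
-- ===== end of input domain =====

-- B replaces A's three separate set computations (union, double intersection, per-element
-- membership-counting comprehension) by ONE counting pass building a dict element -> number of
-- sets containing it, and reads every output off that counter.

-- ===== PORT A =====
def compararFrutas (frutas1 : List String) (frutas2 : List String) (frutas3 : List String) : List (String × List String) :=
  let totales := PySem.Set.union (PySem.Set.union frutas1 frutas2) frutas3
  let comunes := PySem.Set.inter (PySem.Set.inter frutas1 frutas2) frutas3
  let unicas := PySem.Set.ofList (totales.filter (fun f =>
    ([PySem.Set.contains frutas1 f, PySem.Set.contains frutas2 f, PySem.Set.contains frutas3 f].count true) == 1))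
  [("FrutasTotales", totales), ("FrutasComunes", comunes), ("FrutasUnicas", unicas)]

-- ===== PORT B =====
-- cnt[f] = cnt.get(f, 0) + 1 over the three sets in order; then keys / count==3 / count==1.
def compararFrutas_alt (frutas1 : List String) (frutas2 : List String) (frutas3 : List String) : List (String × List String) :=
  let cnt := (frutas1 ++ frutas2 ++ frutas3).foldl
    (fun d x => d.insert x (d.getD x 0 + 1)) (PySem.Dict.empty : PySem.Dict String Int)
  let totales := PySem.Set.ofList cnt.keys
  let comunes := PySem.Set.ofList ((cnt.items.filter (fun p => p.2 == 3)).map (·.1))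
  let unicas := PySem.Set.ofList ((cnt.items.filter (fun p => p.2 == 1)).map (·.1))
  [("FrutasTotales", totales), ("FrutasComunes", comunes), ("FrutasUnicas", unicas)]

-- ===== PRECONDITION & SPEC =====
-- The Python arguments are sets; under the type convention a set is encoded as a list of
-- DISTINCT elements, so Pre_ states exactly that the three lists are valid set encodings.
def Pre_compararFrutas (frutas1 : List String) (frutas2 : List String) (frutas3 : List String) : Prop :=
  frutas1.Nodup ∧ frutas2.Nodup ∧ frutas3.Nodup
instance (frutas1 : List String) (frutas2 : List String) (frutas3 : List String) : Decidable (Pre_compararFrutas frutas1 frutas2 frutas3) := by unfold Pre_compararFrutas; infer_instance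
def pvWitness_compararFrutas : List String × List String × List String :=
  (["manzana", "pera"], ["pera", "kiwi"], ["kiwi"])

def Spec_compararFrutas (frutas1 : List String) (frutas2 : List String) (frutas3 : List String) (out : List (String × List String)) : Prop := out = compararFrutas_alt frutas1 frutas2 frutas3
instance (frutas1 : List String) (frutas2 : List String) (frutas3 : List String) (out : List (String × List String)) : Decidable (Spec_compararFrutas frutas1 frutas2 frutas3 out) := by unfold Spec_compararFrutas; infer_instance

-- ===== CLAIM (what is proved, stated in full; the proofs are below) =====
def Claim_equal_compararFrutas : Prop := ∀ (frutas1 : List String) (frutas2 : List String) (frutas3 : List String), Dom_compararFrutas frutas1 frutas2 frutas3 → Pre_compararFrutas frutas1 frutas2 frutas3 → Spec_compararFrutas frutas1 frutas2 frutas3 (compararFrutas frutas1 frutas2 frutas3)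

-- ===== LEMMAS AND PROOFS =====

-- The count of x in f1 ++ f2 ++ f3 as membership indicators (sets are Nodup).
theorem count_append3 (f1 f2 f3 : List String) (h1 : f1.Nodup) (h2 : f2.Nodup) (h3 : f3.Nodup)
    (x : String) :
    (f1 ++ f2 ++ f3).count x =
      (if x ∈ f1 then 1 else 0) + (if x ∈ f2 then 1 else 0) + (if x ∈ f3 then 1 else 0) := by
  rw [List.count_append, List.count_append]
  have e : ∀ (l : List String), l.Nodup → l.count x = if x ∈ l then 1 else 0 := by
    intro l hl
    by_cases hx : x ∈ l
    · simp [hx, List.count_eq_one_of_mem hl hx]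
    · simp [hx, List.count_eq_zero_of_not_mem hx]
  rw [e f1 h1, e f2 h2, e f3 h3]

theorem totales_eq (f1 f2 f3 : List String) (h1 : f1.Nodup) :
    PySem.Set.ofList (f1 ++ f2 ++ f3)
      = PySem.Set.union (PySem.Set.union f1 f2) f3 := by
  rw [PySem.Set.ofList_append, PySem.Set.ofList_append,
      PySem.Set.ofList_eq_self_of_nodup f1 h1]
  rfl

theorem comunes_eq (f1 f2 f3 : List String) (h1 : f1.Nodup) (h2 : f2.Nodup) (h3 : f3.Nodup) :
    (PySem.Set.ofList (f1 ++ f2 ++ f3)).filter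
        (fun k => ((f1 ++ f2 ++ f3).count k : Int) == 3)
      = PySem.Set.inter (PySem.Set.inter f1 f2) f3 := by
  have hfilter : ∀ x ∈ PySem.Set.ofList (f1 ++ f2 ++ f3),
      (((f1 ++ f2 ++ f3).count x : Int) == 3)
        = (x ∈ f1 ∧ x ∈ f2 ∧ x ∈ f3 : Bool) := by
    intro x _
    rw [count_append3 f1 f2 f3 h1 h2 h3]
    by_cases a : x ∈ f1 <;> by_cases b : x ∈ f2 <;> by_cases c : x ∈ f3 <;> simp [a, b, c]
  rw [List.filter_congr hfilter]
  rw [PySem.Set.ofList_append, PySem.Set.ofList_append, PySem.Set.ofList_eq_self_of_nodup f1 h1,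
      PySem.Set.update_eq_append_filter, PySem.Set.update_eq_append_filter]
  rw [List.filter_append, List.filter_append]
  have g2 : ∀ (l : List String), (l.filter (fun y => !(PySem.Set.contains f1 y))).filter
      (fun x => (x ∈ f1 ∧ x ∈ f2 ∧ x ∈ f3 : Bool)) = [] := by
    intro l
    rw [List.filter_filter, List.filter_eq_nil_iff]
    intro x _
    by_cases a : x ∈ f1 <;> simp [a]
  have g3 : ((PySem.Set.ofList f3).filter
        (fun y => !(PySem.Set.contains (f1 ++ (PySem.Set.ofList f2).filter (fun y => !(PySem.Set.contains f1 y))) y))).filter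
      (fun x => (x ∈ f1 ∧ x ∈ f2 ∧ x ∈ f3 : Bool)) = [] := by
    rw [List.filter_filter, List.filter_eq_nil_iff]
    intro x _
    by_cases a : x ∈ f1
    · simp
      tauto
    · simp [a]
  rw [g2, g3, List.append_nil, List.append_nil]
  have : PySem.Set.inter (PySem.Set.inter f1 f2) f3
      = f1.filter (fun x => (x ∈ f1 ∧ x ∈ f2 ∧ x ∈ f3 : Bool)) := by
    simp only [PySem.Set.inter, List.filter_filter]
    apply List.filter_congr
    intro x hx
    simp [hx, Bool.and_comm]
  rw [this]

theorem unicas_eq (f1 f2 f3 : List String) (h1 : f1.Nodup) (h2 : f2.Nodup) (h3 : f3.Nodup) :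
    (PySem.Set.ofList (f1 ++ f2 ++ f3)).filter
        (fun k => ((f1 ++ f2 ++ f3).count k : Int) == 1)
      = (PySem.Set.ofList (f1 ++ f2 ++ f3)).filter (fun f =>
          ([PySem.Set.contains f1 f, PySem.Set.contains f2 f, PySem.Set.contains f3 f].count true) == 1) := by
  apply List.filter_congr
  intro x _
  rw [count_append3 f1 f2 f3 h1 h2 h3]
  by_cases a : x ∈ f1 <;> by_cases b : x ∈ f2 <;> by_cases c : x ∈ f3 <;>
    simp [a, b, c]

-- The counter dict's items are (key, multiplicity) over the deduplicated concatenation.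
theorem cnt_items (f1 f2 f3 : List String) :
    ((f1 ++ f2 ++ f3).foldl (fun d x => d.insert x (d.getD x 0 + 1))
        (PySem.Dict.empty : PySem.Dict String Int)).items
      = (PySem.Set.ofList (f1 ++ f2 ++ f3)).map
          (fun k => (k, ((f1 ++ f2 ++ f3).count k : Int))) := by
  rw [PySem.Dict.foldl_insert_getD_add_one_eq_counter, PySem.Dict.items_counter]

theorem cnt_keys (f1 f2 f3 : List String) :
    ((f1 ++ f2 ++ f3).foldl (fun d x => d.insert x (d.getD x 0 + 1))
        (PySem.Dict.empty : PySem.Dict String Int)).keys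
      = PySem.Set.ofList (f1 ++ f2 ++ f3) := by
  rw [PySem.Dict.foldl_insert_getD_add_one_eq_counter, PySem.Dict.keys_counter]

theorem filter_items_eq (f1 f2 f3 : List String) (c : Int) :
    ((((f1 ++ f2 ++ f3).foldl (fun d x => d.insert x (d.getD x 0 + 1))
        (PySem.Dict.empty : PySem.Dict String Int)).items.filter (fun p => p.2 == c)).map (·.1))
      = (PySem.Set.ofList (f1 ++ f2 ++ f3)).filter
          (fun k => ((f1 ++ f2 ++ f3).count k : Int) == c) := by
  rw [cnt_items, List.filter_map, List.map_map]
  simp [Function.comp_def]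

-- ===== VERDICT (by name: the statement is the Claim_ definition above) =====
theorem compararFrutas_spec : Claim_equal_compararFrutas := by
  intro f1 f2 f3 _ ⟨h1, h2, h3⟩
  unfold Spec_compararFrutas compararFrutas compararFrutas_alt
  simp only []
  rw [cnt_keys, filter_items_eq, filter_items_eq, comunes_eq f1 f2 f3 h1 h2 h3,
      unicas_eq f1 f2 f3 h1 h2 h3, totales_eq f1 f2 f3 h1]
  have hnodT : (PySem.Set.union (PySem.Set.union f1 f2) f3).Nodup :=
    PySem.Set.nodup_union _ _ (PySem.Set.nodup_union _ _ h1)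
  rw [PySem.Set.ofList_eq_self_of_nodup _ hnodT,
      PySem.Set.ofList_eq_self_of_nodup _ (PySem.Set.nodup_inter _ _ (PySem.Set.nodup_inter _ _ h1)),
      PySem.Set.ofList_eq_self_of_nodup _ (hnodT.filter _)]
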